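-- pv_equiv track=rewrite | github.com/morozooff/leetCode-solutions | easy/replaceAllDigitsWithCharacters.py | replaceDigits
-- ===== SOURCE A (Python) =====
-- def replaceDigits(s: str) -> str:
--
--     def shift(symb, shift_value):
--         ascii_num = ord(symb)
--         new_symb = chr(ascii_num + shift_value)
--         return new_symb
--
--     new_s = ''
--
--     def isEven(num):
--         return num%2==0
--
--     for i in range(len(s)):
--         if isEven(i):
--             current_symb = s[i]
--             new_s += current_symb
--         else:
--             new_s += shift(current_symb, int(s[i]))
--
--     return new_s
-- ===== SOURCE B (Python) =====
-- def replaceDigits(s: str) -> str: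
--     evens = s[::2]
--     odds = s[1::2]
--     shifted = [chr(ord(a) + int(d)) for a, d in zip(evens, odds)]
--     merged = []
--     for a, b in zip(evens, shifted):
--         merged.append(a)
--         merged.append(b)
--     if len(evens) > len(shifted):
--         merged.append(evens[-1])
--     return ''.join(merged)
-- ===== Notes on version B (the rewrite author's own statement) =====
-- stated objective: alternative
-- what changed: Replaces A's character-by-character pass with a parity branch and a carried current_symb by a staged split/transform/merge: slice out even- and odd-position characters, shift the even stream by the zipped digit stream in one comprehension, then interleave the two streams back (plus the unpaired trailing character).
import Mathlib
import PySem

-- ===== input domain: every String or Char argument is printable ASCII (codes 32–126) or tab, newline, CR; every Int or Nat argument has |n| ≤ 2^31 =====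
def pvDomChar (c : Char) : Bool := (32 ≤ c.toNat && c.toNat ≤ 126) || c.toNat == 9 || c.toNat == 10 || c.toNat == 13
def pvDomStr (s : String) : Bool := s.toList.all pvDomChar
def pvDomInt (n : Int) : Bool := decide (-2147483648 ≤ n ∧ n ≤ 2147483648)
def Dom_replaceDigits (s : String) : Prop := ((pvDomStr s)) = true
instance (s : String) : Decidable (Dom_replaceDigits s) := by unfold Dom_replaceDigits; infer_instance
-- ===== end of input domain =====

-- B replaces A's single pass (parity branch + carried current_symb) by a staged
-- split / transform / merge: slice out the even- and odd-position characters, shift the even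
-- stream by the zipped digit stream, then interleave the two streams back; equal on Pre_.

-- ===== PORT A =====
-- int(single-character string): exact via PySem.Int.ofChars?; the .getD 0 is only reached on
-- inputs outside Pre_ (where Python raises ValueError).
def pvDigitVal (c : Char) : Int := (PySem.Int.ofChars? [c]).getD 0
-- chr(ord(c) + v): exact for 0 ≤ v and result below 0x110000, which holds on Dom with a digit shift
def pvShiftChar (c : Char) (v : Int) : Char := Char.ofNat (c.toNat + v.toNat)

-- loop body of A: state = (new_s, current_symb); current_symb is `none` before first assignment
def pvStepA (cs : List Char) (st : List Char × Option Char) (i : Int) : List Char × Option Char :=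
  if PySem.Int.mod i 2 == 0 then
    (st.1 ++ [PySem.List.pyGetD cs i ' '], some (PySem.List.pyGetD cs i ' '))
  else
    (st.1 ++ [pvShiftChar (st.2.getD ' ') (pvDigitVal (PySem.List.pyGetD cs i ' '))], st.2)

def replaceDigits (s : String) : String :=
  let cs := s.toList
  String.ofList (((PySem.List.pyRange 0 (cs.length : Int) 1).foldl (pvStepA cs) ([], none)).1)

-- ===== PORT B =====
-- evens = s[::2]; odds = s[1::2]; shifted = zip-comprehension; interleave; trailing char.
-- evens[-1] is guarded by len(evens) > len(shifted), so pyGetD's default is never returned.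
def replaceDigits_alt (s : String) : String :=
  let cs := s.toList
  let evens := (PySem.List.slice? cs none none 2).getD []
  let odds := (PySem.List.slice? cs (some 1) none 2).getD []
  let shifted := (evens.zip odds).map (fun p => pvShiftChar p.1 (pvDigitVal p.2))
  let merged := (evens.zip shifted).foldl (fun acc p => acc ++ [p.1, p.2]) []
  let merged := if shifted.length < evens.length then merged ++ [PySem.List.pyGetD evens (-1) ' '] else merged
  String.ofList merged

-- ===== PRECONDITION & SPEC =====
-- Pre_ excludes exactly the inputs where Python A raises ValueError (int() of a non-digit
-- character at an odd index); B raises there as well.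
def Pre_replaceDigits (s : String) : Prop :=
  ∀ i : Nat, i < s.toList.length → i % 2 = 1 → (s.toList.getD i ' ').isDigit = true
instance (s : String) : Decidable (Pre_replaceDigits s) := by unfold Pre_replaceDigits; infer_instance

def pvWitness_replaceDigits : String := "a1c1e1"

def Spec_replaceDigits (s : String) (out : String) : Prop := out = replaceDigits_alt s
instance (s : String) (out : String) : Decidable (Spec_replaceDigits s out) := by unfold Spec_replaceDigits; infer_instance

-- ===== CLAIM (what is proved, stated in full; the proofs are below) =====
def Claim_equal_replaceDigits : Prop := ∀ (s : String), Dom_replaceDigits s → Pre_replaceDigits s → Spec_replaceDigits s (replaceDigits s)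

-- ===== LEMMAS AND PROOFS =====

-- the common normal form both ports are reduced to: pairwise recursion over the characters
def pvPairs : List Char → List Char
  | [] => []
  | [a] => [a]
  | a :: b :: r => a :: pvShiftChar a (pvDigitVal b) :: pvPairs r

-- the even-position characters of a list
def pvEvens : List Char → List Char
  | [] => []
  | [a] => [a]
  | a :: _ :: r => a :: pvEvens r

lemma pvEvens_get? (xs : List Char) (k : Nat) : (pvEvens xs)[k]? = xs[2 * k]? := by
  induction xs using pvEvens.induct generalizing k with
  | case1 => simp [pvEvens]
  | case2 a =>
      cases k with
      | zero => simp [pvEvens]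
      | succ m => simp [pvEvens]
  | case3 a b r ih =>
      cases k with
      | zero => simp [pvEvens]
      | succ m =>
          have : 2 * (m + 1) = (2 * m) + 1 + 1 := by omega
          simp [pvEvens, this, ih]

lemma pvEvens_length (xs : List Char) : (pvEvens xs).length = (xs.length + 1) / 2 := by
  induction xs using pvEvens.induct with
  | case1 => simp [pvEvens]
  | case2 a => simp [pvEvens]
  | case3 a b r ih => simp [pvEvens, ih]; omega

lemma pvEvens_cons (b : Char) (r : List Char) : pvEvens (b :: r) = b :: pvEvens r.tail := by
  cases r <;> rfl

lemma pvEvens_eq_rangeMap (xs : List Char) :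
    (List.range ((xs.length + 1) / 2)).map (fun k => xs.getD (2 * k) ' ') = pvEvens xs := by
  apply List.ext_getElem
  · simp [pvEvens_length]
  · intro k h1 h2
    have h1' : k < (xs.length + 1) / 2 := by simpa using h1
    have h2k : 2 * k < xs.length := by omega
    have hg := pvEvens_get? xs k
    rw [List.getElem?_eq_getElem h2, List.getElem?_eq_getElem h2k] at hg
    simp only [List.getElem_map, List.getElem_range]
    rw [List.getD_eq_getElem xs ' ' h2k, ← Option.some_inj.mp hg]

lemma pvOdds_eq_rangeMap (xs : List Char) :
    (List.range (xs.length / 2)).map (fun k => xs.getD (2 * k + 1) ' ') = pvEvens xs.tail := by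
  apply List.ext_getElem
  · simp [pvEvens_length]; omega
  · intro k h1 h2
    have h1' : k < xs.length / 2 := by simpa using h1
    have h2k : 2 * k < xs.tail.length := by simp; omega
    have h2k' : 2 * k + 1 < xs.length := by simp at h2k; omega
    have hg := pvEvens_get? xs.tail k
    rw [List.getElem?_eq_getElem h2, List.getElem?_eq_getElem h2k] at hg
    simp only [List.getElem_map, List.getElem_range]
    rw [List.getD_eq_getElem xs ' ' h2k', Option.some_inj.mp hg, List.getElem_tail]

-- s[::2] is exactly pvEvens
lemma pvSlice_evens (xs : List Char) :
    PySem.List.slice? xs none none 2 = some (pvEvens xs) := by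
  rw [← pvEvens_eq_rangeMap]
  simp only [PySem.List.slice?, PySem.List.sliceIndices]
  norm_num
  have hcount : (if 0 < xs.length then (((xs.length : ℤ) + 2 - 1) / 2).toNat else 0)
      = (xs.length + 1) / 2 := by
    split_ifs <;> omega
  rw [hcount]
  rw [List.filterMap_congr (g := fun k => some (xs.getD (2 * k) ' '))
      (by intro x hx
          simp only [List.mem_range] at hx
          have h2 : 2 * x < xs.length := by omega
          have h3 : ((2 : ℤ) * (x : ℤ)).toNat = 2 * x := by omega
          rw [h3]
          simp [List.getD, h2])]
  simp

-- s[1::2] is exactly pvEvens of the tail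
lemma pvSlice_odds (xs : List Char) :
    PySem.List.slice? xs (some 1) none 2 = some (pvEvens xs.tail) := by
  rw [← pvOdds_eq_rangeMap]
  simp only [PySem.List.slice?, PySem.List.sliceIndices]
  norm_num
  have hcount : (if 1 < xs.length then
        (((xs.length : ℤ) - min 1 (xs.length : ℤ) + 2 - 1) / 2).toNat else 0)
      = xs.length / 2 := by
    split_ifs <;> omega
  rw [hcount]
  rw [List.filterMap_congr (g := fun k => some (xs.getD (2 * k + 1) ' '))
      (by intro x hx
          simp only [List.mem_range] at hx
          have h2 : 2 * x + 1 < xs.length := by omega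
          have h3 : (min 1 (xs.length : ℤ) + 2 * (x : ℤ)).toNat = 2 * x + 1 := by omega
          rw [h3]
          simp [List.getD, h2])]
  simp

-- B's staged pipeline, run on pvEvens streams, is the pairwise recursion
lemma pvStaged_eq_pairs (cs : List Char) :
    (if ((pvEvens cs).zip (pvEvens cs.tail)).length < (pvEvens cs).length then
       ((pvEvens cs).zip (((pvEvens cs).zip (pvEvens cs.tail)).map
           (fun p => pvShiftChar p.1 (pvDigitVal p.2)))).foldl
           (fun acc p => acc ++ [p.1, p.2]) [] ++ [PySem.List.pyGetD (pvEvens cs) (-1) ' ']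
     else
       ((pvEvens cs).zip (((pvEvens cs).zip (pvEvens cs.tail)).map
           (fun p => pvShiftChar p.1 (pvDigitVal p.2)))).foldl
           (fun acc p => acc ++ [p.1, p.2]) [])
    = pvPairs cs := by
  induction cs using pvPairs.induct with
  | case1 => simp [pvEvens, pvPairs]
  | case2 a => simp [pvEvens, pvPairs, PySem.List.pyGetD_neg_one]
  | case3 a b r ih =>
      have he : pvEvens (a :: b :: r) = a :: pvEvens r := rfl
      have ho : pvEvens ((a :: b :: r).tail) = b :: pvEvens r.tail := pvEvens_cons b r
      rw [he, ho] at *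
      simp only [List.zip_cons_cons, List.map_cons, List.foldl_cons, List.nil_append,
        List.length_cons, List.length_zip] at *
      rw [PySem.List.foldl_append_eq_flatMap] at ih ⊢
      simp only [List.nil_append] at ih ⊢
      by_cases hc : min (pvEvens r).length (pvEvens r.tail).length < (pvEvens r).length
      · have hne : pvEvens r ≠ [] := by
          intro h; rw [h] at hc; simp at hc
        rw [if_pos hc] at ih
        split_ifs with hg
        · rw [PySem.List.pyGetD_neg_one (a :: pvEvens r) ' ' (List.cons_ne_nil a _),
              List.getLast_cons hne, ← PySem.List.pyGetD_neg_one (pvEvens r) ' ' hne,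
              List.append_assoc, ih]
          rfl
        · exact (hg (by omega)).elim
      · rw [if_neg hc] at ih
        split_ifs with hg
        · exact absurd (by omega : min (pvEvens r).length (pvEvens r.tail).length < (pvEvens r).length) hc
        · rw [ih]
          rfl

-- ===== A-side: A's loop equals the pairwise recursion =====
-- A's loop body, rephrased to take the (index, character) pair that `enumerate` supplies
def pvStepA' (st : List Char × Option Char) (p : Int × Char) : List Char × Option Char :=
  if PySem.Int.mod p.1 2 == 0 then
    (st.1 ++ [p.2], some p.2)
  else
    (st.1 ++ [pvShiftChar (st.2.getD ' ') (pvDigitVal p.2)], st.2)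

lemma pvMod_two_succ_succ (k : Int) (hk : PySem.Int.mod k 2 = 0) :
    PySem.Int.mod (k + 1 + 1) 2 = 0 := by
  simp only [PySem.Int.mod, Int.fmod_eq_emod] at *
  omega

lemma pvFoldA (r : List Char) (k : Int) (hk : PySem.Int.mod k 2 = 0)
    (acc : List Char) (cur : Option Char) :
    ((PySem.List.enumerate r k).foldl pvStepA' (acc, cur)).1 = acc ++ pvPairs r := by
  have hdvd : (2 : Int) ∣ k := by
    simp only [PySem.Int.mod, Int.fmod_eq_emod] at hk; omega
  have hnd : ¬ (2 : Int) ∣ (k + 1) := by omega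
  induction r using pvPairs.induct generalizing k acc cur with
  | case1 => simp [PySem.List.enumerate_nil, pvPairs]
  | case2 a =>
      simp [PySem.List.enumerate_cons, PySem.List.enumerate_nil, pvPairs, pvStepA', hdvd]
  | case3 a b r ih =>
      rw [PySem.List.enumerate_cons, PySem.List.enumerate_cons]
      simp only [List.foldl_cons]
      rw [show pvStepA' (acc, cur) (k, a) = (acc ++ [a], some a) by simp [pvStepA', hdvd],
          show pvStepA' (acc ++ [a], some a) (k + 1, b)
              = (acc ++ [a] ++ [pvShiftChar a (pvDigitVal b)], some a) by
            simp [pvStepA', hnd],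
          ih (k + 1 + 1) (pvMod_two_succ_succ k hk) (acc ++ [a] ++ [pvShiftChar a (pvDigitVal b)])
            (some a) (by omega) (by omega)]
      simp [pvPairs]

-- ===== VERDICT (by name: the statement is the Claim_ definition above) =====
theorem replaceDigits_spec : Claim_equal_replaceDigits := by
  intro s _ _
  unfold Spec_replaceDigits replaceDigits replaceDigits_alt
  have h1 : (PySem.List.pyRange 0 ((s.toList.length : Int)) 1).foldl (pvStepA s.toList) ([], none)
      = (PySem.List.enumerate s.toList 0).foldl pvStepA' ([], none) := by
    rw [PySem.List.enumerate_eq_map_pyRange s.toList ' ', List.foldl_map]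
    simp [PySem.List.len_eq]
    rfl
  simp only [h1]
  rw [pvFoldA s.toList 0 (by decide) [] none]
  simp only [pvSlice_evens, pvSlice_odds, Option.getD_some, List.length_map, List.nil_append]
  rw [← pvStaged_eq_pairs s.toList]
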